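-- pv_equiv track=rewrite | github.com/meyersh/adventofcode | day12.py | countPotNums
-- ===== SOURCE A (Python) =====
-- def countPotNums(pots,n):
--     """Our puzzle input starts at n, where n is the number 0th
--     pot. Positive numbers to the right and negative numbers to the
--     left. We want the sum of the numbers having plants (the ones from our
--     binary "pots" value. Whew."""
--
--     i = n-1 # index value. Ugly, I know. (zero indexed, right?)
--     t = pots
--     total = 0
--     while t:
--         if t&1:
--             total += i
--         t = t >> 1
--
--         i = i - 1
--
--     return total
-- ===== SOURCE B (Python) =====
-- def countPotNums(pots, n):
--     """MSB-first scan over the binary string: string index k corresponds to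
--     bit position L-1-k, which contributes n-1-(L-1-k) = n-L+k when set."""
--     s = bin(pots)[2:]
--     L = len(s)
--     return sum(n - L + k for k, c in enumerate(s) if c == '1')
-- ===== Notes on version B (the rewrite author's own statement) =====
-- stated objective: alternative
-- what changed: Replaces A's LSB-first while-loop over shifted bits (tracking a decrementing index) with an MSB-first scan over the binary string bin(pots)[2:], adding n - L + k for each '1' at string index k.
-- outside the precondition, e.g. on countPotNums(-1, 0): A does not finish within the time limit, B returns -1
import Mathlib
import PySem

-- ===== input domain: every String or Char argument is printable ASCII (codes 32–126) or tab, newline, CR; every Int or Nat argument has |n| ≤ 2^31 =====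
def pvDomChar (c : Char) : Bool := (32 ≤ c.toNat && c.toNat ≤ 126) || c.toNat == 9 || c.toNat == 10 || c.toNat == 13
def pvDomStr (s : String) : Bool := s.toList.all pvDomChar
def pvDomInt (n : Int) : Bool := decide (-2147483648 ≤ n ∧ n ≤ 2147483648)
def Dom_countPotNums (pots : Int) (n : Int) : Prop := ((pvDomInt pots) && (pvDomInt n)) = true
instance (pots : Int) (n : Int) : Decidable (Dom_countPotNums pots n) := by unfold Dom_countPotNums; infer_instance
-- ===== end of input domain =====

-- B replaces A's LSB-first shift loop by an MSB-first scan of the binary string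
-- (bin(pots)[2:]), adding n - L + k for each '1' at string index k (alternative
-- decomposition, same cost). Pre_ requires 0 ≤ pots: A's `while t` never terminates
-- on negative pots (t >> 1 stabilises at -1).


-- ===== PORT A =====
-- the `while t:` loop; the guard `t ≤ 0` is exact for t ≥ 0 (guaranteed by
-- Pre_countPotNums); Python diverges for negative t, which Pre_ excludes.
def countPotNumsLoop (t : Int) (i : Int) (total : Int) : Int :=
  if h : t ≤ 0 then total
  else countPotNumsLoop (t >>> 1) (i - 1)
        (if PySem.Int.band t 1 = 1 then total + i else total)
termination_by t.toNat
decreasing_by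
  obtain ⟨m, rfl⟩ : ∃ m : Nat, t = (m : Int) := ⟨t.toNat, by omega⟩
  show (((m >>> 1 : Nat) : Int)).toNat < (m : Int).toNat
  simp [Nat.shiftRight_eq_div_pow]
  omega

def countPotNums (pots : Int) (n : Int) : Int :=
  countPotNumsLoop pots (n - 1) 0

-- ===== PORT B =====
-- hand port of bin(t)[2:] for t ≥ 0: the binary digits of t, MSB first
-- (exact on the nonnegative domain Pre_countPotNums admits).
def binDigits (t : Nat) : List Char :=
  if t = 0 then [] else binDigits (t / 2) ++ [if t % 2 = 1 then '1' else '0']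

def binStr (t : Nat) : List Char := if t = 0 then ['0'] else binDigits t

def countPotNums_alt (pots : Int) (n : Int) : Int :=
  let s := binStr pots.toNat      -- s = bin(pots)[2:]; exact for pots ≥ 0 (Pre_)
  let L := PySem.List.len s
  -- sum(n - L + k for k, c in enumerate(s) if c == '1')
  (PySem.List.enumerate s).foldl
    (fun acc kc => if kc.2 = '1' then acc + (n - L + kc.1) else acc) 0

-- ===== PRECONDITION & SPEC =====
-- Pre_ excludes pots < 0, on which A's while-loop never terminates (t >> 1 → -1).
def Pre_countPotNums (pots : Int) (n : Int) : Prop := 0 ≤ pots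
instance (pots : Int) (n : Int) : Decidable (Pre_countPotNums pots n) := by unfold Pre_countPotNums; infer_instance
def pvWitness_countPotNums : Int × Int := (21, 3)

def Spec_countPotNums (pots : Int) (n : Int) (out : Int) : Prop := out = countPotNums_alt pots n
instance (pots : Int) (n : Int) (out : Int) : Decidable (Spec_countPotNums pots n out) := by unfold Spec_countPotNums; infer_instance

-- ===== CLAIM (what is proved, stated in full; the proofs are below) =====
def Claim_equal_countPotNums : Prop := ∀ (pots : Int) (n : Int), Dom_countPotNums pots n → Pre_countPotNums pots n → Spec_countPotNums pots n (countPotNums pots n)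

-- ===== LEMMAS AND PROOFS =====

-- the per-'1' contribution, as a plain sum over the enumerated list
def sumE (n L : Int) (l : List (Int × Char)) : Int :=
  (l.map (fun kc => if kc.2 = '1' then n - L + kc.1 else 0)).sum

theorem foldl_eq_sumE (n L : Int) (l : List (Int × Char)) (acc : Int) :
    l.foldl (fun acc kc => if kc.2 = '1' then acc + (n - L + kc.1) else acc) acc
      = acc + sumE n L l := by
  have := PySem.List.foldl_add l (fun kc => if kc.2 = '1' then n - L + kc.1 else 0) acc
  rw [sumE]
  rw [← this]
  congr 1
  funext a kc
  split <;> simp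

theorem enumerate_append_singleton {α : Type} (xs : List α) (c : α) (start : Int) :
    PySem.List.enumerate (xs ++ [c]) start
      = PySem.List.enumerate xs start ++ [(start + xs.length, c)] := by
  induction xs generalizing start with
  | nil => simp [PySem.List.enumerate]
  | cons x t ih =>
      simp only [List.cons_append, PySem.List.enumerate, ih, List.length_cons]
      push_cast
      ring_nf

theorem sumE_shift (n L : Int) (l : List (Int × Char)) :
    sumE n (L + 1) l = sumE (n - 1) L l := by
  unfold sumE
  congr 1
  apply List.map_congr_left
  intro kc _
  have : n - (L + 1) + kc.1 = n - 1 - L + kc.1 := by ring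
  split <;> simp [this]

theorem countPotNumsLoop_acc (t i total : Int) :
    countPotNumsLoop t i total = total + countPotNumsLoop t i 0 := by
  by_cases h : t ≤ 0
  · conv_lhs => rw [countPotNumsLoop]
    conv_rhs => rw [countPotNumsLoop]
    simp [h]
  · conv_lhs => rw [countPotNumsLoop]
    conv_rhs => rw [countPotNumsLoop]
    simp only [dif_neg h]
    rw [countPotNumsLoop_acc (t >>> 1) (i - 1)
          (if PySem.Int.band t 1 = 1 then total + i else total),
        countPotNumsLoop_acc (t >>> 1) (i - 1)
          (if PySem.Int.band t 1 = 1 then 0 + i else 0)]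
    split <;> ring
termination_by t.toNat
decreasing_by
  all_goals
    obtain ⟨m, rfl⟩ : ∃ m : Nat, t = (m : Int) := ⟨t.toNat, by omega⟩
    show (((m >>> 1 : Nat) : Int)).toNat < (m : Int).toNat
    simp [Nat.shiftRight_eq_div_pow]
    omega

theorem main_lemma (m : Nat) (n : Int) :
    countPotNumsLoop (m : Int) (n - 1) 0
      = sumE n ((binDigits m).length) (PySem.List.enumerate (binDigits m) 0) := by
  by_cases hm : m = 0
  · subst hm
    rw [countPotNumsLoop, binDigits]
    simp [sumE]
  · have hpos : 0 < m := Nat.pos_of_ne_zero hm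
    have hstep : ¬ ((m : Int) ≤ 0) := by omega
    rw [countPotNumsLoop]
    simp only [hstep, dite_false]
    have hshift : ((m : Int) >>> 1) = ((m / 2 : Nat) : Int) := by
      show (((m >>> 1 : Nat)) : Int) = ((m / 2 : Nat) : Int)
      simp [Nat.shiftRight_eq_div_pow]
    have hband : PySem.Int.band (m : Int) 1 = ((m % 2 : Nat) : Int) := by
      rw [PySem.Int.band_one]
      exact_mod_cast PySem.Int.mod_natCast m 2
    have hdig : binDigits m
        = binDigits (m / 2) ++ [if m % 2 = 1 then '1' else '0'] := by
      rw [binDigits]; simp [hm]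
    rw [countPotNumsLoop_acc, hshift, hband]
    have ih := main_lemma (m / 2) (n - 1)
    rw [hdig, enumerate_append_singleton]
    rw [sumE, List.map_append, List.sum_append, ← sumE]
    simp only [List.length_append, List.length_singleton]
    rw [show ((((binDigits (m / 2)).length + 1 : Nat)) : Int)
          = ((binDigits (m / 2)).length : Int) + 1 from by push_cast; ring]
    rw [sumE_shift]
    rw [show n - 1 - 1 = (n - 1) - 1 by ring] at ih ⊢
    rw [← ih]
    rcases Nat.mod_two_eq_zero_or_one m with h2 | h2
    · simp [h2]
    · simp [h2]
      ring
termination_by m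
decreasing_by omega

-- ===== VERDICT (by name: the statement is the Claim_ definition above) =====
theorem countPotNums_spec : Claim_equal_countPotNums := by
  intro pots n _ hpre
  unfold Spec_countPotNums countPotNums countPotNums_alt
  obtain ⟨m, rfl⟩ : ∃ m : Nat, pots = (m : Int) := ⟨pots.toNat, by
    unfold Pre_countPotNums at hpre; omega⟩
  simp only [Int.toNat_natCast]
  by_cases hm : m = 0
  · subst hm
    rw [countPotNumsLoop]
    simp [binStr, PySem.List.enumerate]
  · rw [binStr]
    simp only [hm, if_false]
    rw [main_lemma m n, foldl_eq_sumE]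
    simp [PySem.List.len]
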